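-- pv_equiv track=rewrite | github.com/zxpekko/A-study-of-two-stage-normalized-cut-solution-algorithms | utils/environment.py | get_node_candidates
-- ===== SOURCE A (Python) =====
-- VERY_LARGE_INT = 10  # 65536
--
-- def get_node_candidates(list_lower_mat, num_nodes, last_act=False):
--     visited_once = set()
--     visited_twice = set()
--     for i in range(num_nodes):
--         for j in range(i + 1):
--             if i != j:
--                 if list_lower_mat[i][j] > VERY_LARGE_INT:
--                     if i in visited_once:
--                         visited_twice.add(i)
--                         visited_once.remove(i)
--                     else:
--                         visited_once.add(i)
--                     if j in visited_once:
--                         visited_twice.add(j)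
--                         visited_once.remove(j)
--                     else:
--                         visited_once.add(j)
--     if last_act:
--         assert len(visited_once) == 2
--         return visited_once
--     else:
--         candidates = list(range(num_nodes))
--         for i in visited_twice:
--             candidates.remove(i)
--         for i in visited_once:
--             candidates.remove(i)
--         return candidates
-- ===== SOURCE B (Python) =====
-- VERY_LARGE_INT = 10  # 65536
--
-- def get_node_candidates(list_lower_mat, num_nodes, last_act=False):
--     count = [0] * num_nodes
--     for i in range(1, num_nodes):
--         row = list_lower_mat[i]
--         for j in range(i):
--             if row[j] > VERY_LARGE_INT:
--                 count[i] += 1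
--                 count[j] += 1
--     if last_act:
--         odd = [x for x in range(num_nodes) if count[x] % 2 == 1]
--         assert len(odd) == 2
--         return set(odd)
--     return [x for x in range(num_nodes) if count[x] == 0]
-- ===== Notes on version B (the rewrite author's own statement) =====
-- stated objective: simpler
-- what changed: Replaces the two mid-scan toggled sets and the final list.remove loops by a per-node heavy-edge count array filled in one scan of the strict lower triangle, then classifies nodes by count (count==0 for candidates, odd count for the last_act set) in a separate comprehension pass.
-- outside the precondition, e.g. on get_node_candidates([[0], [20, 0]], 2, True): A returns {0, 1}, B returns {0, 1}; on get_node_candidates([[0], [20, 0], [20, 0, 0], [20, 0, 0, 0]], 4, False): A raises ValueError, B returns []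
import Mathlib
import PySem

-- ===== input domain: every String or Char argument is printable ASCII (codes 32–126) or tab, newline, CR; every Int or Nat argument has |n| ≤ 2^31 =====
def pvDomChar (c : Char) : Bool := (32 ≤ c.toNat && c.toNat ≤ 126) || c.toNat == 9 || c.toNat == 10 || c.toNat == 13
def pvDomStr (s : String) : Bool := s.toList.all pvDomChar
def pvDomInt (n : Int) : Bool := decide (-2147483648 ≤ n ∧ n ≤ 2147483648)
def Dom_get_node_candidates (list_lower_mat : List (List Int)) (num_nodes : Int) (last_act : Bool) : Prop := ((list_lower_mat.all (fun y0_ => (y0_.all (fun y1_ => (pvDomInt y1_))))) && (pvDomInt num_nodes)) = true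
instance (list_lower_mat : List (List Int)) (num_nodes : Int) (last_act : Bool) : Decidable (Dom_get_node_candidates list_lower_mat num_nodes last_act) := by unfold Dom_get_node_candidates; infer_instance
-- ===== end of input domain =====

-- ===== PORT A =====
-- B replaces A's two toggled sets by a per-node heavy-edge count array and classifies nodes in a second pass (objective: simpler).
-- NOTE: iteration over visited_twice/visited_once only removes elements from a duplicate-free list, so the
-- result does not depend on Python's set iteration order; last_act=True (A returns a raw set) is outside Pre_.
def gncToggle (st : PySem.Set Int × PySem.Set Int) (v : Int) : PySem.Set Int × PySem.Set Int :=
  if PySem.Set.contains st.1 v then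
    ((PySem.Set.remove? st.1 v).getD st.1, PySem.Set.add st.2 v)  -- remove? guarded by contains: never none
  else (PySem.Set.add st.1 v, st.2)

def get_node_candidates (list_lower_mat : List (List Int)) (num_nodes : Int) (last_act : Bool) : List Int :=
  let st : PySem.Set Int × PySem.Set Int :=
    (PySem.List.pyRange 0 num_nodes 1).foldl (fun st i =>
      (PySem.List.pyRange 0 (i + 1) 1).foldl (fun st j =>
        if i ≠ j then
          -- pyGetD defaults are unreachable under Pre_ (out of range = IndexError, excluded)
          if 10 < PySem.List.pyGetD (PySem.List.pyGetD list_lower_mat i []) j 0 then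
            gncToggle (gncToggle st i) j
          else st
        else st) st) (PySem.Set.empty, PySem.Set.empty)
  if last_act then
    (if PySem.Set.len st.1 = 2 then st.1 else [])  -- [] = AssertionError (outside Pre_)
  else
    let c1 := st.2.foldl (fun c v => c.bind (fun l => PySem.List.remove? l v))
                (some (PySem.List.pyRange 0 num_nodes 1))
    let c2 := st.1.foldl (fun c v => c.bind (fun l => PySem.List.remove? l v)) c1
    c2.getD []  -- none = ValueError (outside Pre_)

-- ===== PORT B =====
def gncBump (cnt : List Int) (k : Int) : List Int :=
  PySem.List.pySetD cnt k (PySem.List.pyGetD cnt k 0 + 1)  -- count[k] += 1 (k is always in range here)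

def get_node_candidates_alt (list_lower_mat : List (List Int)) (num_nodes : Int) (last_act : Bool) : List Int :=
  let count : List Int :=
    (PySem.List.pyRange 1 num_nodes 1).foldl (fun cnt i =>
      let row := PySem.List.pyGetD list_lower_mat i []
      (PySem.List.pyRange 0 i 1).foldl (fun cnt j =>
        if 10 < PySem.List.pyGetD row j 0 then gncBump (gncBump cnt i) j else cnt) cnt)
      (List.replicate num_nodes.toNat 0)
  if last_act then
    let odd := (PySem.List.pyRange 0 num_nodes 1).filter
      (fun x => PySem.Int.mod (PySem.List.pyGetD count x 0) 2 == 1)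
    (if odd.length = 2 then odd else [])  -- set(odd) = odd (odd is duplicate-free); [] = AssertionError
  else
    (PySem.List.pyRange 0 num_nodes 1).filter (fun x => PySem.List.pyGetD count x 0 == 0)

-- ===== PRECONDITION & SPEC =====
def gncHeavy (m : List (List Int)) (i j : Int) : Bool :=
  decide (10 < PySem.List.pyGetD (PySem.List.pyGetD m i []) j 0)

-- endpoints (with multiplicity) of the heavy edges in the strict lower triangle; count = heavy degree of a node
def gncHeavyEnds (m : List (List Int)) (n : Int) : List Int :=
  (PySem.List.pyRange 1 n 1).flatMap (fun i =>
    (PySem.List.pyRange 0 i 1).flatMap (fun j => if gncHeavy m i j then [i, j] else []))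

-- Pre_ excludes: last_act=True (A returns a raw Python set — its element order is not a List-Int value — or
-- raises AssertionError), rows missing/too short (IndexError), and nodes of odd heavy degree ≥ 3 (A's final
-- candidates.remove hits such a node twice: ValueError).
def Pre_get_node_candidates (list_lower_mat : List (List Int)) (num_nodes : Int) (last_act : Bool) : Prop :=
  last_act = false ∧
  -- redundant short-circuit (implied by the next clause when 2 ≤ num_nodes): keeps Pre_ cheap to decide for huge num_nodes
  (num_nodes ≤ (list_lower_mat.length : Int) ∨ num_nodes ≤ 1) ∧
  (∀ i ∈ PySem.List.pyRange 1 num_nodes 1,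
      i < (list_lower_mat.length : Int) ∧ i ≤ ((PySem.List.pyGetD list_lower_mat i []).length : Int)) ∧
  (∀ x ∈ PySem.List.pyRange 0 num_nodes 1,
      (gncHeavyEnds list_lower_mat num_nodes).count x % 2 = 1 →
      (gncHeavyEnds list_lower_mat num_nodes).count x = 1)
instance (list_lower_mat : List (List Int)) (num_nodes : Int) (last_act : Bool) : Decidable (Pre_get_node_candidates list_lower_mat num_nodes last_act) := by unfold Pre_get_node_candidates; infer_instance

def pvWitness_get_node_candidates : List (List Int) × Int × Bool := ([[0], [20, 0], [0, 0, 0]], 3, false)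

def Spec_get_node_candidates (list_lower_mat : List (List Int)) (num_nodes : Int) (last_act : Bool) (out : List Int) : Prop := out = get_node_candidates_alt list_lower_mat num_nodes last_act
instance (list_lower_mat : List (List Int)) (num_nodes : Int) (last_act : Bool) (out : List Int) : Decidable (Spec_get_node_candidates list_lower_mat num_nodes last_act out) := by unfold Spec_get_node_candidates; infer_instance

-- ===== CLAIM (what is proved, stated in full; the proofs are below) =====
def Claim_equal_get_node_candidates : Prop := ∀ (list_lower_mat : List (List Int)) (num_nodes : Int) (last_act : Bool), Dom_get_node_candidates list_lower_mat num_nodes last_act → Pre_get_node_candidates list_lower_mat num_nodes last_act → Spec_get_node_candidates list_lower_mat num_nodes last_act (get_node_candidates list_lower_mat num_nodes last_act)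

-- ===== LEMMAS AND PROOFS =====

-- every heavy-edge endpoint lies in [0, n)
theorem gnc_mem_ends_bounds (m : List (List Int)) (n : Int) (e : Int)
    (h : e ∈ gncHeavyEnds m n) : 0 ≤ e ∧ e < n := by
  unfold gncHeavyEnds at h
  simp only [List.mem_flatMap, PySem.List.mem_pyRange_one] at h
  obtain ⟨i, hi, j, hj, hmem⟩ := h
  by_cases hh : gncHeavy m i j <;> simp [hh] at hmem <;> rcases hmem with rfl | rfl <;> omega

-- A's nested loop is the fold of the toggle over the heavy-edge endpoint list
theorem gncA_loop (m : List (List Int)) (n : Int) (s0 : PySem.Set Int × PySem.Set Int) :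
    (PySem.List.pyRange 0 n 1).foldl (fun st i =>
      (PySem.List.pyRange 0 (i + 1) 1).foldl (fun st j =>
        if i ≠ j then
          if 10 < PySem.List.pyGetD (PySem.List.pyGetD m i []) j 0 then
            gncToggle (gncToggle st i) j
          else st
        else st) st) s0
    = (gncHeavyEnds m n).foldl gncToggle s0 := by
  unfold gncHeavyEnds
  rw [List.foldl_flatMap]
  by_cases hn : n ≤ 0
  · rw [PySem.List.pyRange_one_eq_nil hn, PySem.List.pyRange_one_eq_nil (by omega : n ≤ 1)]
    rfl
  · rw [PySem.List.pyRange_one_append 0 1 n (by omega) (by omega), List.foldl_append,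
        show PySem.List.pyRange 0 1 1 = [0] from rfl]
    simp only [List.foldl_cons, List.foldl_nil]
    rw [show PySem.List.pyRange 0 (0 + 1) 1 = [0] from rfl]
    simp only [List.foldl_cons, List.foldl_nil, ne_eq, not_true_eq_false, if_false]
    apply PySem.List.foldl_congr_mem
    intro st i hi
    have hi1 : 1 ≤ i := (PySem.List.mem_pyRange_one.mp hi).1
    rw [PySem.List.pyRange_one_succ_right (by omega : (0:Int) ≤ i), List.foldl_append]
    simp only [List.foldl_cons, List.foldl_nil, ne_eq, not_true_eq_false, if_false]
    rw [List.foldl_flatMap]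
    apply PySem.List.foldl_congr_mem
    intro st j hj
    have hji : j < i := (PySem.List.mem_pyRange_one.mp hj).2
    rw [if_pos (by omega : i ≠ j)]
    by_cases hh : gncHeavy m i j <;>
      simp only [gncHeavy, decide_eq_true_eq] at hh <;>
      simp [gncHeavy, hh]

-- B's nested loop is the fold of the bump over the same endpoint list
theorem gncB_loop (m : List (List Int)) (n : Int) (c0 : List Int) :
    (PySem.List.pyRange 1 n 1).foldl (fun cnt i =>
      (PySem.List.pyRange 0 i 1).foldl (fun cnt j =>
        if 10 < PySem.List.pyGetD (PySem.List.pyGetD m i []) j 0 then gncBump (gncBump cnt i) j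
        else cnt) cnt) c0
    = (gncHeavyEnds m n).foldl gncBump c0 := by
  unfold gncHeavyEnds
  rw [List.foldl_flatMap]
  apply PySem.List.foldl_congr_mem
  intro cnt i _
  rw [List.foldl_flatMap]
  apply PySem.List.foldl_congr_mem
  intro cnt j _
  by_cases hh : gncHeavy m i j <;>
    simp only [gncHeavy, decide_eq_true_eq] at hh <;>
    simp [gncHeavy, hh]

-- the bump fold counts occurrences
theorem gnc_bump_count (E : List Int) : ∀ (cnt : List Int), (∀ e ∈ E, 0 ≤ e ∧ e.toNat < cnt.length) →
    ∀ v : Int, 0 ≤ v → v.toNat < cnt.length →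
    PySem.List.pyGetD (E.foldl gncBump cnt) v 0 = PySem.List.pyGetD cnt v 0 + (E.count v : Int) := by
  induction E with
  | nil => intro cnt _ v _ _; simp
  | cons e E ih =>
    intro cnt hE v hv0 hvlen
    have he := hE e List.mem_cons_self
    have hlen' : (gncBump cnt e).length = cnt.length := PySem.List.length_pySetD _ _ _
    simp only [List.foldl_cons]
    rw [ih (gncBump cnt e)
        (fun x hx => by rw [hlen']; exact hE x (List.mem_cons_of_mem e hx)) v hv0
        (by omega)]
    have hee : ((e.toNat : ℕ) : ℤ) = e := Int.toNat_of_nonneg he.1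
    have hvv : ((v.toNat : ℕ) : ℤ) = v := Int.toNat_of_nonneg hv0
    have hkey : PySem.List.pyGetD (gncBump cnt e) v 0
        = PySem.List.pyGetD cnt v 0 + if v = e then 1 else 0 := by
      unfold gncBump
      rw [← hee, ← hvv, PySem.List.pyGetD_pySetD_natCast cnt e.toNat v.toNat _ 0 he.2]
      by_cases hve : v.toNat = e.toNat
      · rw [if_pos hve, if_pos (by omega), hve]
      · rw [if_neg hve, if_neg (by omega), add_zero]
    rw [hkey, List.count_cons]
    by_cases hve : v = e <;> simp [hve] <;> omega

-- loop invariant tying A's two sets to the endpoint multiplicities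
def gncInv (once twice : List Int) (c : Int → Nat) : Prop :=
  once.Nodup ∧ twice.Nodup ∧ ∀ v : Int, (v ∈ once ↔ c v % 2 = 1) ∧ (v ∈ twice ↔ 2 ≤ c v)

theorem gncToggle_inv (once twice : PySem.Set Int) (c : Int → Nat) (e : Int)
    (h : gncInv once twice c) :
    gncInv (gncToggle (once, twice) e).1 (gncToggle (once, twice) e).2
      (fun v => c v + if v = e then 1 else 0) := by
  obtain ⟨h1, h2, h3⟩ := h
  by_cases he : e ∈ once
  · have hodd : c e % 2 = 1 := ((h3 e).1).mp he
    unfold gncToggle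
    rw [if_pos (by simpa using (PySem.Set.contains_iff once e).mpr he),
        PySem.Set.remove?_of_mem he]
    refine ⟨by simpa using PySem.Set.nodup_discard once e h1, PySem.Set.nodup_add twice e h2, fun v => ?_⟩
    by_cases hv : v = e
    · subst hv
      simp [PySem.Set.mem_discard, PySem.Set.mem_add]
      constructor
      · omega
      · have := ((h3 v).2)
        omega
    · simp [PySem.Set.mem_discard, PySem.Set.mem_add, hv, h3 v]
  · have hev : ¬ c e % 2 = 1 := fun hc => he (((h3 e).1).mpr hc)
    unfold gncToggle
    rw [if_neg (by simpa using fun hc => he ((PySem.Set.contains_iff once e).mp hc))]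
    refine ⟨PySem.Set.nodup_add once e h1, h2, fun v => ?_⟩
    by_cases hv : v = e
    · subst hv
      simp [PySem.Set.mem_add]
      refine ⟨by omega, ?_⟩
      rw [(h3 v).2]
      omega
    · simp [PySem.Set.mem_add, hv, h3 v]


theorem gnc_fold_inv (E : List Int) : ∀ (once twice : PySem.Set Int) (c : Int → Nat),
    gncInv once twice c →
    gncInv (E.foldl gncToggle (once, twice)).1 (E.foldl gncToggle (once, twice)).2
      (fun v => c v + E.count v) := by
  induction E with
  | nil => intro once twice c h; simpa using h
  | cons e E ih =>
    intro once twice c h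
    simp only [List.foldl_cons]
    have h2 := ih (gncToggle (once, twice) e).1 (gncToggle (once, twice) e).2 _
      (gncToggle_inv once twice c e h)
    rw [Prod.mk.eta] at h2
    have hfun : (fun v => c v + (e :: E).count v)
        = fun v => (c v + if v = e then 1 else 0) + E.count v := by
      funext v
      simp only [List.count_cons]
      by_cases hv : v = e <;> simp [hv] <;> omega
    rw [hfun]
    exact h2

-- removing a duplicate-free sublist one element at a time is a filter
theorem gnc_remove_fold (xs : List Int) : ∀ (l : List Int), l.Nodup → xs.Nodup → (∀ x ∈ xs, x ∈ l) →
    xs.foldl (fun c v => c.bind (fun t => PySem.List.remove? t v)) (some l)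
    = some (l.filter (fun y => !decide (y ∈ xs))) := by
  induction xs with
  | nil => intro l _ _ _; simp
  | cons x xs ih =>
    intro l hl hxs hsub
    simp only [List.foldl_cons, Option.bind_some]
    rw [PySem.List.remove?_eq_some_erase l x (hsub x List.mem_cons_self)]
    have hxnot : x ∉ xs := (List.nodup_cons.mp hxs).1
    rw [ih (l.erase x) (hl.erase x) (List.nodup_cons.mp hxs).2
        (fun y hy => (List.mem_erase_of_ne (fun h : y = x => hxnot (h ▸ hy))).mpr
          (hsub y (List.mem_cons_of_mem x hy)))]
    congr 1
    rw [List.Nodup.erase_eq_filter hl, List.filter_filter]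
    apply List.filter_congr
    intro y hy
    by_cases h1 : y = x <;> by_cases h2 : y ∈ xs <;> simp [h1, h2]

-- ===== VERDICT (by name: the statement is the Claim_ definition above) =====
theorem get_node_candidates_spec : Claim_equal_get_node_candidates := by
  intro m n la hDom hPre
  obtain ⟨hla, hsz, hidx, hdeg⟩ := hPre
  subst hla
  unfold Spec_get_node_candidates get_node_candidates get_node_candidates_alt
  simp only [Bool.false_eq_true, if_false]
  rw [gncA_loop, gncB_loop]
  have hinv0 : gncInv PySem.Set.empty PySem.Set.empty (fun _ => 0) :=
    ⟨List.nodup_nil, List.nodup_nil, fun v => by simp [PySem.Set.empty]⟩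
  have hinv := gnc_fold_inv (gncHeavyEnds m n) PySem.Set.empty PySem.Set.empty _ hinv0
  simp only [Nat.zero_add] at hinv
  unfold gncInv at hinv
  beta_reduce at hinv
  obtain ⟨hn1, hn2, hmem0⟩ := hinv
  set E := gncHeavyEnds m n with hE
  set st := E.foldl gncToggle (PySem.Set.empty, PySem.Set.empty) with hst
  have hmem : ∀ v : Int, (v ∈ st.1 ↔ E.count v % 2 = 1) ∧ (v ∈ st.2 ↔ 2 ≤ E.count v) :=
    fun v => hmem0 v
  -- bounds for members of the two sets
  have hbound : ∀ v : Int, 1 ≤ E.count v → 0 ≤ v ∧ v < n := by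
    intro v hv
    have hvE : v ∈ E := List.count_pos_iff.mp (by omega)
    rw [hE] at hvE
    exact gnc_mem_ends_bounds m n v hvE
  have hbound1 : ∀ v ∈ st.1, 0 ≤ v ∧ v < n := fun v hv =>
    hbound v (by have := (hmem v).1.mp hv; omega)
  have hbound2 : ∀ v ∈ st.2, 0 ≤ v ∧ v < n := fun v hv =>
    hbound v (by have := (hmem v).2.mp hv; omega)
  have hdisj : ∀ v ∈ st.1, v ∉ st.2 := by
    intro v h1 h2
    have ho := (hmem v).1.mp h1
    have ht := (hmem v).2.mp h2
    have hvb := hbound v (by omega)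
    have := hdeg v (PySem.List.mem_pyRange_one.mpr hvb) ho
    omega
  -- A's removal loops are filters
  rw [gnc_remove_fold st.2 (PySem.List.pyRange 0 n 1) (PySem.List.nodup_pyRange_one 0 n) hn2
      (fun v hv => PySem.List.mem_pyRange_one.mpr (hbound2 v hv))]
  rw [gnc_remove_fold st.1 _ ((PySem.List.nodup_pyRange_one 0 n).filter _) hn1
      (fun v hv => List.mem_filter.mpr
        ⟨PySem.List.mem_pyRange_one.mpr (hbound1 v hv), by simp [hdisj v hv]⟩)]
  simp only [Option.getD_some]
  -- B's count list holds the endpoint multiplicities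
  have hcount : ∀ x : Int, 0 ≤ x → x < n →
      PySem.List.pyGetD (E.foldl gncBump (List.replicate n.toNat 0)) x 0 = (E.count x : Int) := by
    intro x hx0 hxn
    rw [gnc_bump_count E (List.replicate n.toNat 0)
        (fun e he => by
          have := gnc_mem_ends_bounds m n e he
          exact ⟨this.1, by simp only [List.length_replicate]; omega⟩)
        x hx0 (by simp only [List.length_replicate]; omega)]
    rw [PySem.List.pyGetD_of_nonneg _ _ hx0]
    simp
  rw [List.filter_filter]
  apply List.filter_congr
  intro x hx
  have hx' := PySem.List.mem_pyRange_one.mp hx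
  rw [hcount x hx'.1 hx'.2]
  have ho := (hmem x).1
  have ht := (hmem x).2
  by_cases h1 : x ∈ st.1 <;> by_cases h2 : x ∈ st.2 <;> simp [h1, h2]
  · have := ho.mp h1; omega
  · have := ho.mp h1; omega
  · have := ht.mp h2; omega
  · have hno : ¬ E.count x % 2 = 1 := fun hc => h1 (ho.mpr hc)
    have hnt : ¬ 2 ≤ E.count x := fun hc => h2 (ht.mpr hc)
    omega
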